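-- pv_equiv track=rewrite | github.com/Taimaishu/-argus-intelligence-platform | backend/app/core/osint/web_scraper.py | _extract_social_media
-- ===== SOURCE A (Python) =====
-- from typing import Dict, Any, List, Optional
--
-- def _extract_social_media(
--     links: List[Dict[str, str]]
-- ) -> Dict[str, List[str]]:
--     """Extract social media profile links."""
--     social_media = {
--         "twitter": [],
--         "facebook": [],
--         "linkedin": [],
--         "instagram": [],
--         "youtube": [],
--         "github": [],
--         "telegram": [],
--     }
--
--     for link in links:
--         url = link["url"].lower()
--
--         if "twitter.com" in url or "x.com" in url:
--             social_media["twitter"].append(link["url"])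
--         elif "facebook.com" in url:
--             social_media["facebook"].append(link["url"])
--         elif "linkedin.com" in url:
--             social_media["linkedin"].append(link["url"])
--         elif "instagram.com" in url:
--             social_media["instagram"].append(link["url"])
--         elif "youtube.com" in url:
--             social_media["youtube"].append(link["url"])
--         elif "github.com" in url:
--             social_media["github"].append(link["url"])
--         elif "t.me" in url:
--             social_media["telegram"].append(link["url"])
--
--     # Remove empty lists
--     return {k: v for k, v in social_media.items() if v}
-- ===== SOURCE B (Python) =====
-- # Staged per-platform filter passes with an accumulated exclusion list, instead
-- # of A's per-link if/elif first-match classification loop.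
-- _PLATFORM_SUBS = [
--     ("twitter", ["twitter.com", "x.com"]),
--     ("facebook", ["facebook.com"]),
--     ("linkedin", ["linkedin.com"]),
--     ("instagram", ["instagram.com"]),
--     ("youtube", ["youtube.com"]),
--     ("github", ["github.com"]),
--     ("telegram", ["t.me"]),
-- ]
--
--
-- def _extract_social_media(links):
--     urls = [link["url"] for link in links]
--     result = {}
--     seen = []  # substrings of all higher-priority platforms
--     for name, subs in _PLATFORM_SUBS:
--         bucket = [u for u in urls
--                   if any(s in u.lower() for s in subs)
--                   and not any(s in u.lower() for s in seen)]
--         if bucket: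
--             result[name] = bucket
--         seen = seen + subs
--     return result
-- ===== Notes on version B (the rewrite author's own statement) =====
-- stated objective: alternative
-- what changed: Replaces A's per-link if/elif first-match classification loop by seven staged per-platform filter passes over all URLs, where priority is encoded as an accumulated exclusion list of higher-priority substrings instead of branch order.
-- outside the precondition, e.g. on _extract_social_media([{'name': 'x'}]): A raises KeyError, B raises KeyError
import Mathlib
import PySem

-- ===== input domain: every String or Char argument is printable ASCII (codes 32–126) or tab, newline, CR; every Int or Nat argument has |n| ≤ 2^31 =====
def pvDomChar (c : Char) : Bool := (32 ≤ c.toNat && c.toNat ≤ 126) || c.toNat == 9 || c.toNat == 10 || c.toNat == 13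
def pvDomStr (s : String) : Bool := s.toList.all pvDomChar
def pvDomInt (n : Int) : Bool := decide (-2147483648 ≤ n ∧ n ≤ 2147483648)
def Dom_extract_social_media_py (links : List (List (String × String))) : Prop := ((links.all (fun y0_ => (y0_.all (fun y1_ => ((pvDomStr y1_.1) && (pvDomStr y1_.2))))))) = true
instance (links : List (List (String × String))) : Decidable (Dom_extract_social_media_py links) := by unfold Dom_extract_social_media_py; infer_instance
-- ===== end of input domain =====

-- B replaces A's per-link if/elif first-match classification by seven staged
-- per-platform filter passes (priority = an accumulated exclusion list);
-- objective: alternative, same asymptotic cost.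

-- ===== PORT A =====
-- link["url"]  (Pre_ guarantees the key is present; "" is returned only outside Pre_)
def pyUrl (link : List (String × String)) : String :=
  (PySem.Dict.ofList link).getD "url" ""

def smInit : PySem.Dict String (List String) :=
  PySem.Dict.ofList [("twitter", []), ("facebook", []), ("linkedin", []),
    ("instagram", []), ("youtube", []), ("github", []), ("telegram", [])]

def smStep (d : PySem.Dict String (List String)) (link : List (String × String)) :
    PySem.Dict String (List String) :=
  let url := PySem.Str.lower (pyUrl link)
  if PySem.Str.isIn "twitter.com" url || PySem.Str.isIn "x.com" url then
    d.modify "twitter" [] (· ++ [pyUrl link])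
  else if PySem.Str.isIn "facebook.com" url then d.modify "facebook" [] (· ++ [pyUrl link])
  else if PySem.Str.isIn "linkedin.com" url then d.modify "linkedin" [] (· ++ [pyUrl link])
  else if PySem.Str.isIn "instagram.com" url then d.modify "instagram" [] (· ++ [pyUrl link])
  else if PySem.Str.isIn "youtube.com" url then d.modify "youtube" [] (· ++ [pyUrl link])
  else if PySem.Str.isIn "github.com" url then d.modify "github" [] (· ++ [pyUrl link])
  else if PySem.Str.isIn "t.me" url then d.modify "telegram" [] (· ++ [pyUrl link])
  else d

def extract_social_media_py (links : List (List (String × String))) : List (String × List String) :=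
  ((links.foldl smStep smInit).items).filter (fun p => !p.2.isEmpty)

-- ===== PORT B =====
def smRules : List (String × List String) :=
  [("twitter", ["twitter.com", "x.com"]), ("facebook", ["facebook.com"]),
   ("linkedin", ["linkedin.com"]), ("instagram", ["instagram.com"]),
   ("youtube", ["youtube.com"]), ("github", ["github.com"]), ("telegram", ["t.me"])]

-- one staged pass for platform (name, subs): keep urls matching subs and none of `seen`
def smPass (urls seen subs : List String) : List String :=
  urls.filter (fun u =>
    subs.any (fun s => PySem.Str.isIn s (PySem.Str.lower u)) &&
    !(seen.any (fun s => PySem.Str.isIn s (PySem.Str.lower u))))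

def extract_social_media_py_alt (links : List (List (String × String))) : List (String × List String) :=
  let urls := links.map pyUrl
  (smRules.foldl (fun (st : List String × List (String × List String)) r =>
      let bucket := smPass urls st.1 r.2
      (st.1 ++ r.2, if bucket.isEmpty then st.2 else st.2 ++ [(r.1, bucket)]))
    ([], [])).2

-- ===== PRECONDITION & SPEC =====
-- Pre_ excludes exactly the links missing the "url" key, on which the Python A raises KeyError.
def Pre_extract_social_media_py (links : List (List (String × String))) : Prop :=
  ∀ link ∈ links, (PySem.Dict.ofList link).contains "url" = true
instance (links : List (List (String × String))) : Decidable (Pre_extract_social_media_py links) := by unfold Pre_extract_social_media_py; infer_instance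

def pvWitness_extract_social_media_py : (List (List (String × String))) :=
  [[("url", "https://Twitter.com/a")], [("url", "http://example.com")]]

def Spec_extract_social_media_py (links : List (List (String × String))) (out : List (String × List String)) : Prop := out = extract_social_media_py_alt links
instance (links : List (List (String × String))) (out : List (String × List String)) : Decidable (Spec_extract_social_media_py links out) := by unfold Spec_extract_social_media_py; infer_instance

-- ===== CLAIM (what is proved, stated in full; the proofs are below) =====
def Claim_equal_extract_social_media_py : Prop := ∀ (links : List (List (String × String))), Dom_extract_social_media_py links → Pre_extract_social_media_py links → Spec_extract_social_media_py links (extract_social_media_py links)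

-- ===== LEMMAS AND PROOFS =====

-- first-match classification of a url, used only to relate the two ports
def smClassify (url : String) : Option String :=
  let low := PySem.Str.lower url
  (smRules.find? (fun r => r.2.any (fun s => PySem.Str.isIn s low))).map (·.1)

-- the urls classified to platform k, in order
def smCollect (k : String) (links : List (List (String × String))) : List String :=
  (links.map pyUrl).filter (fun u => smClassify u == some k)

lemma smStep_eq (d : PySem.Dict String (List String)) (link : List (String × String)) :
    smStep d link =
      match smClassify (pyUrl link) with
      | some k => d.modify k [] (· ++ [pyUrl link])
      | none => d := by
  unfold smStep smClassify smRules
  cases h1 : PySem.Str.isIn "twitter.com" (PySem.Str.lower (pyUrl link)) <;>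
  cases h2 : PySem.Str.isIn "x.com" (PySem.Str.lower (pyUrl link)) <;>
  cases h3 : PySem.Str.isIn "facebook.com" (PySem.Str.lower (pyUrl link)) <;>
  cases h4 : PySem.Str.isIn "linkedin.com" (PySem.Str.lower (pyUrl link)) <;>
  cases h5 : PySem.Str.isIn "instagram.com" (PySem.Str.lower (pyUrl link)) <;>
  cases h6 : PySem.Str.isIn "youtube.com" (PySem.Str.lower (pyUrl link)) <;>
  cases h7 : PySem.Str.isIn "github.com" (PySem.Str.lower (pyUrl link)) <;>
  cases h8 : PySem.Str.isIn "t.me" (PySem.Str.lower (pyUrl link)) <;>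
  simp only [List.find?, List.any_cons, List.any_nil, Bool.or_false, h1, h2, h3, h4, h5, h6,
    h7, h8, Option.map_some, Option.map_none] <;> rfl

lemma smLoop_eq (links : List (List (String × String)))
    (t f l i y g m : List String) :
    links.foldl smStep (PySem.Dict.mk [("twitter", t), ("facebook", f), ("linkedin", l),
      ("instagram", i), ("youtube", y), ("github", g), ("telegram", m)]) =
    PySem.Dict.mk [("twitter", t ++ smCollect "twitter" links),
      ("facebook", f ++ smCollect "facebook" links),
      ("linkedin", l ++ smCollect "linkedin" links),
      ("instagram", i ++ smCollect "instagram" links),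
      ("youtube", y ++ smCollect "youtube" links),
      ("github", g ++ smCollect "github" links),
      ("telegram", m ++ smCollect "telegram" links)] := by
  induction links generalizing t f l i y g m with
  | nil => simp [smCollect]
  | cons hd tl ih =>
    rw [List.foldl_cons, smStep_eq]
    have hc : smClassify (pyUrl hd) = none ∨ smClassify (pyUrl hd) = some "twitter" ∨
        smClassify (pyUrl hd) = some "facebook" ∨ smClassify (pyUrl hd) = some "linkedin" ∨
        smClassify (pyUrl hd) = some "instagram" ∨ smClassify (pyUrl hd) = some "youtube" ∨
        smClassify (pyUrl hd) = some "github" ∨ smClassify (pyUrl hd) = some "telegram" := by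
      unfold smClassify smRules
      cases h1 : PySem.Str.isIn "twitter.com" (PySem.Str.lower (pyUrl hd)) <;>
      cases h2 : PySem.Str.isIn "x.com" (PySem.Str.lower (pyUrl hd)) <;>
      cases h3 : PySem.Str.isIn "facebook.com" (PySem.Str.lower (pyUrl hd)) <;>
      cases h4 : PySem.Str.isIn "linkedin.com" (PySem.Str.lower (pyUrl hd)) <;>
      cases h5 : PySem.Str.isIn "instagram.com" (PySem.Str.lower (pyUrl hd)) <;>
      cases h6 : PySem.Str.isIn "youtube.com" (PySem.Str.lower (pyUrl hd)) <;>
      cases h7 : PySem.Str.isIn "github.com" (PySem.Str.lower (pyUrl hd)) <;>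
      cases h8 : PySem.Str.isIn "t.me" (PySem.Str.lower (pyUrl hd)) <;>
      simp only [List.find?, List.any_cons, List.any_nil, Bool.or_false, h1, h2, h3, h4, h5,
        h6, h7, h8, Option.map_some, Option.map_none] <;> simp
    rcases hc with h | h | h | h | h | h | h | h <;> rw [h] <;>
      simp [PySem.Dict.modify, PySem.Dict.insert, PySem.Dict.contains, PySem.Dict.getD,
        PySem.Dict.get?, smCollect, h, ih]

lemma smPass_twitter (urls : List String) :
    smPass urls [] ["twitter.com", "x.com"] =
    urls.filter (fun u => smClassify u == some "twitter") := by
  unfold smPass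
  refine List.filter_congr (fun u _ => ?_)
  unfold smClassify smRules
  cases h1 : PySem.Str.isIn "twitter.com" (PySem.Str.lower u) <;>
  cases h2 : PySem.Str.isIn "x.com" (PySem.Str.lower u) <;>
  cases h3 : PySem.Str.isIn "facebook.com" (PySem.Str.lower u) <;>
  cases h4 : PySem.Str.isIn "linkedin.com" (PySem.Str.lower u) <;>
  cases h5 : PySem.Str.isIn "instagram.com" (PySem.Str.lower u) <;>
  cases h6 : PySem.Str.isIn "youtube.com" (PySem.Str.lower u) <;>
  cases h7 : PySem.Str.isIn "github.com" (PySem.Str.lower u) <;>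
  cases h8 : PySem.Str.isIn "t.me" (PySem.Str.lower u) <;>
  simp only [List.find?, List.any_cons, List.any_nil, Bool.or_false, h1, h2, h3, h4, h5, h6,
    h7, h8, Option.map_some, Option.map_none] <;> simp

lemma smPass_facebook (urls : List String) :
    smPass urls ["twitter.com", "x.com"] ["facebook.com"] =
    urls.filter (fun u => smClassify u == some "facebook") := by
  unfold smPass
  refine List.filter_congr (fun u _ => ?_)
  unfold smClassify smRules
  cases h1 : PySem.Str.isIn "twitter.com" (PySem.Str.lower u) <;>
  cases h2 : PySem.Str.isIn "x.com" (PySem.Str.lower u) <;>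
  cases h3 : PySem.Str.isIn "facebook.com" (PySem.Str.lower u) <;>
  cases h4 : PySem.Str.isIn "linkedin.com" (PySem.Str.lower u) <;>
  cases h5 : PySem.Str.isIn "instagram.com" (PySem.Str.lower u) <;>
  cases h6 : PySem.Str.isIn "youtube.com" (PySem.Str.lower u) <;>
  cases h7 : PySem.Str.isIn "github.com" (PySem.Str.lower u) <;>
  cases h8 : PySem.Str.isIn "t.me" (PySem.Str.lower u) <;>
  simp only [List.find?, List.any_cons, List.any_nil, Bool.or_false, h1, h2, h3, h4, h5, h6,
    h7, h8, Option.map_some, Option.map_none] <;> simp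

lemma smPass_linkedin (urls : List String) :
    smPass urls ["twitter.com", "x.com", "facebook.com"] ["linkedin.com"] =
    urls.filter (fun u => smClassify u == some "linkedin") := by
  unfold smPass
  refine List.filter_congr (fun u _ => ?_)
  unfold smClassify smRules
  cases h1 : PySem.Str.isIn "twitter.com" (PySem.Str.lower u) <;>
  cases h2 : PySem.Str.isIn "x.com" (PySem.Str.lower u) <;>
  cases h3 : PySem.Str.isIn "facebook.com" (PySem.Str.lower u) <;>
  cases h4 : PySem.Str.isIn "linkedin.com" (PySem.Str.lower u) <;>
  cases h5 : PySem.Str.isIn "instagram.com" (PySem.Str.lower u) <;>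
  cases h6 : PySem.Str.isIn "youtube.com" (PySem.Str.lower u) <;>
  cases h7 : PySem.Str.isIn "github.com" (PySem.Str.lower u) <;>
  cases h8 : PySem.Str.isIn "t.me" (PySem.Str.lower u) <;>
  simp only [List.find?, List.any_cons, List.any_nil, Bool.or_false, h1, h2, h3, h4, h5, h6,
    h7, h8, Option.map_some, Option.map_none] <;> simp

lemma smPass_instagram (urls : List String) :
    smPass urls ["twitter.com", "x.com", "facebook.com", "linkedin.com"] ["instagram.com"] =
    urls.filter (fun u => smClassify u == some "instagram") := by
  unfold smPass
  refine List.filter_congr (fun u _ => ?_)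
  unfold smClassify smRules
  cases h1 : PySem.Str.isIn "twitter.com" (PySem.Str.lower u) <;>
  cases h2 : PySem.Str.isIn "x.com" (PySem.Str.lower u) <;>
  cases h3 : PySem.Str.isIn "facebook.com" (PySem.Str.lower u) <;>
  cases h4 : PySem.Str.isIn "linkedin.com" (PySem.Str.lower u) <;>
  cases h5 : PySem.Str.isIn "instagram.com" (PySem.Str.lower u) <;>
  cases h6 : PySem.Str.isIn "youtube.com" (PySem.Str.lower u) <;>
  cases h7 : PySem.Str.isIn "github.com" (PySem.Str.lower u) <;>
  cases h8 : PySem.Str.isIn "t.me" (PySem.Str.lower u) <;>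
  simp only [List.find?, List.any_cons, List.any_nil, Bool.or_false, h1, h2, h3, h4, h5, h6,
    h7, h8, Option.map_some, Option.map_none] <;> simp

lemma smPass_youtube (urls : List String) :
    smPass urls ["twitter.com", "x.com", "facebook.com", "linkedin.com", "instagram.com"] ["youtube.com"] =
    urls.filter (fun u => smClassify u == some "youtube") := by
  unfold smPass
  refine List.filter_congr (fun u _ => ?_)
  unfold smClassify smRules
  cases h1 : PySem.Str.isIn "twitter.com" (PySem.Str.lower u) <;>
  cases h2 : PySem.Str.isIn "x.com" (PySem.Str.lower u) <;>
  cases h3 : PySem.Str.isIn "facebook.com" (PySem.Str.lower u) <;>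
  cases h4 : PySem.Str.isIn "linkedin.com" (PySem.Str.lower u) <;>
  cases h5 : PySem.Str.isIn "instagram.com" (PySem.Str.lower u) <;>
  cases h6 : PySem.Str.isIn "youtube.com" (PySem.Str.lower u) <;>
  cases h7 : PySem.Str.isIn "github.com" (PySem.Str.lower u) <;>
  cases h8 : PySem.Str.isIn "t.me" (PySem.Str.lower u) <;>
  simp only [List.find?, List.any_cons, List.any_nil, Bool.or_false, h1, h2, h3, h4, h5, h6,
    h7, h8, Option.map_some, Option.map_none] <;> simp

lemma smPass_github (urls : List String) :
    smPass urls ["twitter.com", "x.com", "facebook.com", "linkedin.com", "instagram.com", "youtube.com"] ["github.com"] =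
    urls.filter (fun u => smClassify u == some "github") := by
  unfold smPass
  refine List.filter_congr (fun u _ => ?_)
  unfold smClassify smRules
  cases h1 : PySem.Str.isIn "twitter.com" (PySem.Str.lower u) <;>
  cases h2 : PySem.Str.isIn "x.com" (PySem.Str.lower u) <;>
  cases h3 : PySem.Str.isIn "facebook.com" (PySem.Str.lower u) <;>
  cases h4 : PySem.Str.isIn "linkedin.com" (PySem.Str.lower u) <;>
  cases h5 : PySem.Str.isIn "instagram.com" (PySem.Str.lower u) <;>
  cases h6 : PySem.Str.isIn "youtube.com" (PySem.Str.lower u) <;>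
  cases h7 : PySem.Str.isIn "github.com" (PySem.Str.lower u) <;>
  cases h8 : PySem.Str.isIn "t.me" (PySem.Str.lower u) <;>
  simp only [List.find?, List.any_cons, List.any_nil, Bool.or_false, h1, h2, h3, h4, h5, h6,
    h7, h8, Option.map_some, Option.map_none] <;> simp

lemma smPass_telegram (urls : List String) :
    smPass urls ["twitter.com", "x.com", "facebook.com", "linkedin.com", "instagram.com", "youtube.com", "github.com"] ["t.me"] =
    urls.filter (fun u => smClassify u == some "telegram") := by
  unfold smPass
  refine List.filter_congr (fun u _ => ?_)
  unfold smClassify smRules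
  cases h1 : PySem.Str.isIn "twitter.com" (PySem.Str.lower u) <;>
  cases h2 : PySem.Str.isIn "x.com" (PySem.Str.lower u) <;>
  cases h3 : PySem.Str.isIn "facebook.com" (PySem.Str.lower u) <;>
  cases h4 : PySem.Str.isIn "linkedin.com" (PySem.Str.lower u) <;>
  cases h5 : PySem.Str.isIn "instagram.com" (PySem.Str.lower u) <;>
  cases h6 : PySem.Str.isIn "youtube.com" (PySem.Str.lower u) <;>
  cases h7 : PySem.Str.isIn "github.com" (PySem.Str.lower u) <;>
  cases h8 : PySem.Str.isIn "t.me" (PySem.Str.lower u) <;>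
  simp only [List.find?, List.any_cons, List.any_nil, Bool.or_false, h1, h2, h3, h4, h5, h6,
    h7, h8, Option.map_some, Option.map_none] <;> simp

-- ===== VERDICT (by name: the statement is the Claim_ definition above) =====
theorem extract_social_media_py_spec : Claim_equal_extract_social_media_py := by
  intro links _ _
  unfold Spec_extract_social_media_py extract_social_media_py extract_social_media_py_alt
  have hinit : smInit = PySem.Dict.mk [("twitter", ([] : List String)), ("facebook", []),
      ("linkedin", []), ("instagram", []), ("youtube", []), ("github", []), ("telegram", [])] := by
    decide
  rw [hinit, smLoop_eq]
  simp only [smRules, List.foldl, List.nil_append, List.cons_append]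
  rw [smPass_twitter, smPass_facebook, smPass_linkedin, smPass_instagram, smPass_youtube,
    smPass_github, smPass_telegram]
  show (PySem.Dict.items _).filter _ = _
  unfold smCollect PySem.Dict.items
  cases hb1 : ((links.map pyUrl).filter (fun u => smClassify u == some "twitter")).isEmpty <;>
  cases hb2 : ((links.map pyUrl).filter (fun u => smClassify u == some "facebook")).isEmpty <;>
  cases hb3 : ((links.map pyUrl).filter (fun u => smClassify u == some "linkedin")).isEmpty <;>
  cases hb4 : ((links.map pyUrl).filter (fun u => smClassify u == some "instagram")).isEmpty <;>
  cases hb5 : ((links.map pyUrl).filter (fun u => smClassify u == some "youtube")).isEmpty <;>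
  cases hb6 : ((links.map pyUrl).filter (fun u => smClassify u == some "github")).isEmpty <;>
  cases hb7 : ((links.map pyUrl).filter (fun u => smClassify u == some "telegram")).isEmpty <;>
  simp [List.filter, hb1, hb2, hb3, hb4, hb5, hb6, hb7]
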